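-- pv_equiv track=rewrite | github.com/oga5/gamestudio_1984_oss | tools/utils/json_utils.py | split_selector
-- ===== SOURCE A (Python) =====
-- def split_selector(selector):
--     """Split selector string by dot, respecting brackets."""
--     parts = []
--     current = []
--     depth = 0
--
--     for char in selector:
--         if char == '.' and depth == 0:
--             if current:
--                 parts.append(''.join(current))
--                 current = []
--         else:
--             if char == '[':
--                 depth += 1
--             elif char == ']':
--                 depth -= 1
--             current.append(char)
--
--     if current:
--         parts.append(''.join(current))
--
--     return parts
-- ===== SOURCE B (Python) =====
-- def split_selector(selector):
--     """Split selector string by dot, respecting brackets.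
--
--     Recursive decomposition: find the first top-level dot, split there,
--     recurse on the remainder (instead of A's single-pass accumulation)."""
--     depth = 0
--     for i, char in enumerate(selector):
--         if char == '[':
--             depth += 1
--         elif char == ']':
--             depth -= 1
--         elif char == '.' and depth == 0:
--             head = selector[:i]
--             rest = split_selector(selector[i+1:])
--             return ([head] if head else []) + rest
--     return [selector] if selector else []
-- ===== Notes on version B (the rewrite author's own statement) =====
-- stated objective: alternative
-- what changed: B splits recursively: it finds the index of the first bracket-depth-0 dot, slices the head off (dropping it when empty) and recurses on the remainder, instead of A's single left-to-right pass accumulating characters into a current buffer.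
import Mathlib
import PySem

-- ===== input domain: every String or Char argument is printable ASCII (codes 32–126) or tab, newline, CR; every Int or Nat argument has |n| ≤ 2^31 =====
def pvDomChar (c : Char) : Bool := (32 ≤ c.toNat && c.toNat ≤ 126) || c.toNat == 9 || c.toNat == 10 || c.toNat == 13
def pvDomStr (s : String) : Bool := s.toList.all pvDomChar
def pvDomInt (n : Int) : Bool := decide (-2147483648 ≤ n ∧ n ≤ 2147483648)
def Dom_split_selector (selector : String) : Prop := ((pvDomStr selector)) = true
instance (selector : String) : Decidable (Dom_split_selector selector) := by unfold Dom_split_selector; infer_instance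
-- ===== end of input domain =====

-- B replaces A's single-pass character accumulation by a recursive find-first-top-level-dot-and-split decomposition (objective: alternative).

-- ===== PORT A =====
-- A's loop body, one step of the fold: state = (parts, current, depth)
def stepA (st : List String × List Char × Int) (c : Char) : List String × List Char × Int :=
  match st with
  | (parts, current, depth) =>
    if c = '.' ∧ depth = 0 then
      if current ≠ [] then (parts ++ [String.mk current], [], depth) else (parts, current, depth)
    else
      let depth := if c = '[' then depth + 1 else if c = ']' then depth - 1 else depth
      (parts, current ++ [c], depth)

def split_selector (selector : String) : List String :=
  let st := selector.toList.foldl stepA ([], [], 0)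
  if st.2.1 ≠ [] then st.1 ++ [String.mk st.2.1] else st.1

-- ===== PORT B =====
-- Source B's scan loop: index of the first dot at bracket depth 0 (branches in Source B's order)
def findDot : List Char → Int → Option Nat
  | [], _ => none
  | c :: cs, d =>
    if c = '[' then (findDot cs (d + 1)).map (· + 1)
    else if c = ']' then (findDot cs (d - 1)).map (· + 1)
    else if c = '.' ∧ d = 0 then some 0
    else (findDot cs d).map (· + 1)

-- Source B's recursion: split at that dot (selector[:i] / selector[i+1:]), recurse on the tail
def altGo (cs : List Char) : List String :=
  match h : findDot cs 0 with
  | none => if cs = [] then [] else [String.mk cs]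
  | some i =>
    let head := cs.take i
    let rest := altGo (cs.drop (i + 1))
    (if head = [] then [] else [String.mk head]) ++ rest
termination_by cs.length
decreasing_by
  have : cs ≠ [] := by intro hn; subst hn; simp [findDot] at h
  cases cs with
  | nil => exact absurd rfl this
  | cons a as => simp only [List.length_drop, List.length_cons]; omega

def split_selector_alt (selector : String) : List String :=
  altGo selector.toList

-- ===== PRECONDITION & SPEC =====
def Spec_split_selector (selector : String) (out : List String) : Prop := out = split_selector_alt selector
instance (selector : String) (out : List String) : Decidable (Spec_split_selector selector out) := by unfold Spec_split_selector; infer_instance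

-- ===== CLAIM (what is proved, stated in full; the proofs are below) =====
def Claim_equal_split_selector : Prop := ∀ (selector : String), Dom_split_selector selector → Spec_split_selector selector (split_selector selector)

-- ===== LEMMAS AND PROOFS =====

-- the specification both ports meet: (first segment, later segments) of the depth-aware split
def segs : List Char → Int → List Char × List (List Char)
  | [], _ => ([], [])
  | c :: cs, d =>
    if c = '.' ∧ d = 0 then
      ([], (segs cs d).1 :: (segs cs d).2)
    else
      let d' := if c = '[' then d + 1 else if c = ']' then d - 1 else d
      (c :: (segs cs d').1, (segs cs d').2)

def render (p : List Char × List (List Char)) : List String :=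
  ((p.1 :: p.2).filter (· ≠ [])).map String.mk

theorem A_loop (cs : List Char) : ∀ (parts : List String) (cur : List Char) (d : Int),
    (let st := cs.foldl stepA (parts, cur, d)
     if st.2.1 ≠ [] then st.1 ++ [String.mk st.2.1] else st.1)
    = parts ++ render (cur ++ (segs cs d).1, (segs cs d).2) := by
  induction cs with
  | nil =>
    intro parts cur d
    by_cases h : cur = [] <;> simp [segs, render, h]
  | cons c cs ih =>
    intro parts cur d
    simp only [List.foldl_cons, stepA, segs]
    by_cases hc : c = '.' ∧ d = 0
    · simp only [if_pos hc]
      by_cases h : cur = []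
      · simp [h, ih, render]
      · simp only [h, ne_eq, not_false_eq_true, if_true, ih]
        simp [render, h, List.append_assoc]
    · simp only [if_neg hc, ih]
      simp [render, List.append_assoc]

theorem find_seg (cs : List Char) : ∀ (d : Int),
    match findDot cs d with
    | none => segs cs d = (cs, [])
    | some i => (segs cs d).1 = cs.take i ∧
        (segs cs d).2 = (segs (cs.drop (i + 1)) 0).1 :: (segs (cs.drop (i + 1)) 0).2 := by
  induction cs with
  | nil => intro d; simp [findDot, segs]
  | cons c cs ih =>
    intro d
    by_cases h1 : c = '['
    · have := ih (d + 1)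
      cases hf : findDot cs (d + 1) with
      | none =>
        simp only [hf] at this
        simp [findDot, segs, h1, hf, this]
      | some j =>
        simp only [hf] at this
        have hdot : ¬ (c = '.' ∧ d = 0) := by simp [h1]
        simp [findDot, segs, h1, hf, this]
    · by_cases h2 : c = ']'
      · have := ih (d - 1)
        cases hf : findDot cs (d - 1) with
        | none =>
          simp only [hf] at this
          simp [findDot, segs, h2, hf, this]
        | some j =>
          simp only [hf] at this
          have hdot : ¬ (c = '.' ∧ d = 0) := by simp [h2]
          simp [findDot, segs, h2, hf, this]
      · by_cases h3 : c = '.' ∧ d = 0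
        · simp [findDot, segs, h3]
        · have := ih d
          cases hf : findDot cs d with
          | none =>
            simp only [hf] at this
            simp [findDot, segs, h1, h2, h3, hf, this]
          | some j =>
            simp only [hf] at this
            simp [findDot, segs, h1, h2, h3, hf, this]

theorem B_eq_aux : ∀ (n : Nat) (cs : List Char), cs.length ≤ n → altGo cs = render (segs cs 0) := by
  intro n
  induction n with
  | zero =>
    intro cs hl
    have hnil : cs = [] := by cases cs with | nil => rfl | cons a as => simp at hl
    subst hnil
    rw [altGo.eq_def]
    simp [findDot, segs, render]
  | succ n ih =>
    intro cs hl
    rw [altGo.eq_def]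
    split
    next h =>
      have hs := find_seg cs 0
      rw [h] at hs
      rw [hs]
      by_cases hn : cs = [] <;> simp [render, hn]
    next i h =>
      have hs := find_seg cs 0
      rw [h] at hs
      have hcs : cs ≠ [] := by intro he; subst he; simp [findDot] at h
      have hlen : (cs.drop (i + 1)).length ≤ n := by
        cases cs with
        | nil => exact absurd rfl hcs
        | cons a as => simp only [List.length_drop, List.length_cons] at hl ⊢; omega
      rw [ih _ hlen]
      simp only [hs.1, hs.2, render]
      by_cases hh : cs.take i = [] <;> simp [hh]

theorem B_eq (cs : List Char) : altGo cs = render (segs cs 0) :=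
  B_eq_aux cs.length cs le_rfl

-- ===== VERDICT (by name: the statement is the Claim_ definition above) =====
theorem split_selector_spec : Claim_equal_split_selector := by
  intro selector _
  show split_selector selector = split_selector_alt selector
  rw [split_selector_alt, B_eq, split_selector]
  have := A_loop selector.toList [] [] 0
  simpa using this
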